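-- pv_equiv track=rewrite | github.com/hugorsz-dev/ldle-diccionario-db | generar_diccionario_inicial.py | sustituirIndiceSuperIndice
-- ===== SOURCE A (Python) =====
-- def numeroASuperindice (numero):
--     if numero == "0": return "⁰";
--     elif numero == "1": return "¹";
--     elif numero == "2": return "²";
--     elif numero == "3": return "³";
--     elif numero == "4": return "⁴";
--     elif numero == "5": return "⁵";
--     elif numero == "6": return "⁶";
--     elif numero == "7": return "⁷";
--     elif numero == "8": return "⁸";
--     elif numero == "9": return "⁹";
--     elif numero == "−": return "⁻"
--     elif numero == "+": return "+"
--     elif numero == "n": return "ⁿ"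
--     elif numero == "x": return "x"
--
-- def sustituirIndiceSuperIndice (cadena):
--
--     cadena = list(cadena)
--     recoger = False;
--
--     for i in range(len(cadena)):
--
--         if recoger == True and cadena[i]!="^":
--             cadena[i] = numeroASuperindice(cadena[i])
--
--         if cadena[i] =="^":
--             if recoger == True: recoger = False;
--             elif recoger == False: recoger = True;
--     cadena = ''.join(cadena)
--     return cadena.replace("^", "");
-- ===== SOURCE B (Python) =====
-- SUP = {'0': '⁰', '1': '¹', '2': '²', '3': '³', '4': '⁴', '5': '⁵',
--        '6': '⁶', '7': '⁷', '8': '⁸', '9': '⁹', '−': '⁻', '+': '+',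
--        'n': 'ⁿ', 'x': 'x'}
--
-- def sustituirIndiceSuperIndice(cadena):
--     segmentos = cadena.split('^')
--     return ''.join(seg if i % 2 == 0 else ''.join(SUP[c] for c in seg)
--                    for i, seg in enumerate(segmentos))
-- ===== Notes on version B (the rewrite author's own statement) =====
-- stated objective: simpler
-- what changed: Replaces A's per-character loop with a mutable toggle flag and in-place list rewriting by splitting on the marker and mapping the superscript table over the odd-indexed segments.
import Mathlib
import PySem

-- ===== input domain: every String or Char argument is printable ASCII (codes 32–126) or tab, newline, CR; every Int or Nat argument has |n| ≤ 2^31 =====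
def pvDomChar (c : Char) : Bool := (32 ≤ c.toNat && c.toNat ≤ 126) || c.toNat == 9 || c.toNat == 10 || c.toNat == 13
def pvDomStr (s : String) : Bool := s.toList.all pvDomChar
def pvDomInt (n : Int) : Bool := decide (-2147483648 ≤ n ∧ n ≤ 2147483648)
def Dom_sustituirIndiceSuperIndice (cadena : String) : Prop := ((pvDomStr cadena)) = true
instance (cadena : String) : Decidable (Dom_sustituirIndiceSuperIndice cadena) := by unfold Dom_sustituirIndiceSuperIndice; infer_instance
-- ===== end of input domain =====

-- B replaces A's stateful per-character toggle flag with split-on-'^' plus map over the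
-- odd-indexed segments (objective: simpler). Return values are proved equal on Pre_, which
-- excludes exactly the inputs on which both Python versions raise.

-- ===== PORT A =====
-- the if/elif chain; Python returns None on fall-through → Option. Every value the Python
-- function returns is a single-character string, so Option Char.
def numeroASuperindice (numero : Char) : Option Char :=
  if numero = '0' then some '⁰'
  else if numero = '1' then some '¹'
  else if numero = '2' then some '²'
  else if numero = '3' then some '³'
  else if numero = '4' then some '⁴'
  else if numero = '5' then some '⁵'
  else if numero = '6' then some '⁶'
  else if numero = '7' then some '⁷'
  else if numero = '8' then some '⁸'
  else if numero = '9' then some '⁹'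
  else if numero = '−' then some '⁻'
  else if numero = '+' then some '+'
  else if numero = 'n' then some 'ⁿ'
  else if numero = 'x' then some 'x'
  else none

-- A's loop 'for i in range(len(cadena))' reads and writes only position i and the flag, so the
-- in-place update at index i is rendered as emitting the (possibly rewritten) character at
-- each step of a structural recursion carrying 'recoger'. '.getD c' keeps the port total
-- where Python stores None and ''.join later raises TypeError: excluded by Pre_ below.
def sustituirIndiceSuperIndiceLoopA : Bool → List Char → List Char
  | _, [] => []
  | recoger, c :: rest =>
    let c1 := if recoger = true ∧ c ≠ '^' then (numeroASuperindice c).getD c else c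
    let recoger' := if c1 = '^' then (if recoger = true then false else true) else recoger
    c1 :: sustituirIndiceSuperIndiceLoopA recoger' rest

def sustituirIndiceSuperIndice (cadena : String) : String :=
  -- ''.join(cadena)  then  cadena.replace("^", "")
  String.ofList (PySem.Chars.replace (sustituirIndiceSuperIndiceLoopA false cadena.toList) ['^'] [])

-- ===== PORT B =====
-- Source B's SUP dict (every value is a single character)
def supDict : PySem.Dict Char Char :=
  PySem.Dict.mk [('0', '⁰'), ('1', '¹'), ('2', '²'), ('3', '³'), ('4', '⁴'), ('5', '⁵'),
                 ('6', '⁶'), ('7', '⁷'), ('8', '⁸'), ('9', '⁹'), ('−', '⁻'), ('+', '+'),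
                 ('n', 'ⁿ'), ('x', 'x')]

-- cadena.split('^') = List.splitOn '^' (single-character separator); enumerate = zipIdx.
-- SUP[c] raises KeyError on a miss; '.getD c' keeps the port total there (outside Pre_).
def sustituirIndiceSuperIndice_alt (cadena : String) : String :=
  String.ofList
    (((cadena.toList.splitOn '^').zipIdx.map
        (fun p => if p.2 % 2 = 1 then p.1.map (fun c => (supDict.get? c).getD c) else p.1)).flatten)

-- ===== PRECONDITION & SPEC =====
-- Pre_ excludes exactly the inputs on which both Pythons raise: a character inside a '^'-marked
-- region (an odd-indexed segment of split('^')) that numeroASuperindice does not map — there A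
-- stores None and ''.join raises TypeError, and B's SUP[c] raises KeyError.
def supAllowed (c : Char) : Bool :=
  c.isDigit || c = '−' || c = '+' || c = 'n' || c = 'x'

def Pre_sustituirIndiceSuperIndice (cadena : String) : Prop :=
  ((cadena.toList.splitOn '^').zipIdx.all
    (fun p => if p.2 % 2 = 1 then p.1.all supAllowed else true)) = true
instance (cadena : String) : Decidable (Pre_sustituirIndiceSuperIndice cadena) := by
  unfold Pre_sustituirIndiceSuperIndice; infer_instance

def pvWitness_sustituirIndiceSuperIndice : String := "metro^2^ y x^n^"

def Spec_sustituirIndiceSuperIndice (cadena : String) (out : String) : Prop := out = sustituirIndiceSuperIndice_alt cadena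
instance (cadena : String) (out : String) : Decidable (Spec_sustituirIndiceSuperIndice cadena out) := by unfold Spec_sustituirIndiceSuperIndice; infer_instance

-- ===== CLAIM (what is proved, stated in full; the proofs are below) =====
def Claim_equal_sustituirIndiceSuperIndice : Prop := ∀ (cadena : String), Dom_sustituirIndiceSuperIndice cadena → Pre_sustituirIndiceSuperIndice cadena → Spec_sustituirIndiceSuperIndice cadena (sustituirIndiceSuperIndice cadena)

-- ===== LEMMAS AND PROOFS =====
-- (the two programs agree on ALL inputs of the Lean ports, Pre_ or not; the proof below does
-- not need Pre_, which only delimits where the Pythons return)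

-- the per-character map both ports compute
def supFun (c : Char) : Char := (numeroASuperindice c).getD c

lemma supDict_eq_supFun (c : Char) : (supDict.get? c).getD c = supFun c := by
  by_cases h0 : c = '0'
  · subst h0; decide
  by_cases h1 : c = '1'
  · subst h1; decide
  by_cases h2 : c = '2'
  · subst h2; decide
  by_cases h3 : c = '3'
  · subst h3; decide
  by_cases h4 : c = '4'
  · subst h4; decide
  by_cases h5 : c = '5'
  · subst h5; decide
  by_cases h6 : c = '6'
  · subst h6; decide
  by_cases h7 : c = '7'
  · subst h7; decide
  by_cases h8 : c = '8'
  · subst h8; decide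
  by_cases h9 : c = '9'
  · subst h9; decide
  by_cases h10 : c = '−'
  · subst h10; decide
  by_cases h11 : c = '+'
  · subst h11; decide
  by_cases h12 : c = 'n'
  · subst h12; decide
  by_cases h13 : c = 'x'
  · subst h13; decide
  simp only [supDict, supFun, numeroASuperindice, PySem.Dict.get?]
  rw [List.find?_eq_none.mpr ?_]
  · simp [h0, h1, h2, h3, h4, h5, h6, h7, h8, h9, h10, h11, h12, h13]
  · intro p hp
    simp only [List.mem_cons, List.not_mem_nil, or_false] at hp
    rcases hp with h|h|h|h|h|h|h|h|h|h|h|h|h|h <;> subst h <;> simp <;>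
      first | exact fun h => h0 h.symm | exact fun h => h1 h.symm | exact fun h => h2 h.symm | exact fun h => h3 h.symm | exact fun h => h4 h.symm | exact fun h => h5 h.symm | exact fun h => h6 h.symm | exact fun h => h7 h.symm | exact fun h => h8 h.symm | exact fun h => h9 h.symm | exact fun h => h10 h.symm | exact fun h => h11 h.symm | exact fun h => h12 h.symm | exact fun h => h13 h.symm

lemma supFun_ne_caret (c : Char) (hc : c ≠ '^') : supFun c ≠ '^' := by
  by_cases g0 : c = '0'
  · subst g0; decide
  by_cases g1 : c = '1'
  · subst g1; decide
  by_cases g2 : c = '2'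
  · subst g2; decide
  by_cases g3 : c = '3'
  · subst g3; decide
  by_cases g4 : c = '4'
  · subst g4; decide
  by_cases g5 : c = '5'
  · subst g5; decide
  by_cases g6 : c = '6'
  · subst g6; decide
  by_cases g7 : c = '7'
  · subst g7; decide
  by_cases g8 : c = '8'
  · subst g8; decide
  by_cases g9 : c = '9'
  · subst g9; decide
  by_cases g10 : c = '−'
  · subst g10; decide
  by_cases g11 : c = '+'
  · subst g11; decide
  by_cases g12 : c = 'n'
  · subst g12; decide
  by_cases g13 : c = 'x'
  · subst g13; decide
  simp only [supFun, numeroASuperindice, if_neg g0, if_neg g1, if_neg g2, if_neg g3,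
    if_neg g4, if_neg g5, if_neg g6, if_neg g7, if_neg g8, if_neg g9, if_neg g10,
    if_neg g11, if_neg g12, if_neg g13, Option.getD_none]
  exact hc

-- reference alternation: map the odd segments, starting with flag b on the first segment
def joinAlt (f : Char → Char) : Bool → List (List Char) → List Char
  | _, [] => []
  | b, s :: rest => (if b then s.map f else s) ++ joinAlt f (!b) rest

-- str.replace with the one-character pattern "^" and empty replacement is filter (· ≠ '^')
lemma replace_caret_eq_filter_go (fuel : Nat) (l acc : List Char) (h : l.length ≤ fuel) :
    PySem.Chars.replace.go ['^'] [] fuel l acc = acc.reverse ++ l.filter (· ≠ '^') := by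
  induction fuel generalizing l acc with
  | zero =>
    cases l with
    | nil => simp [PySem.Chars.replace.go]
    | cons c t => simp at h
  | succ n ih =>
    cases l with
    | nil => simp [PySem.Chars.replace.go]
    | cons c t =>
      simp only [PySem.Chars.replace.go]
      by_cases hc : c = '^'
      · subst hc
        rw [if_pos (by simp [List.isPrefixOf])]
        simp only [List.length_singleton, List.drop_succ_cons, List.drop_zero,
          List.reverse_nil, List.nil_append]
        simp only [List.length_cons] at h
        rw [ih t acc (by omega)]
        simp [List.filter]
      · rw [if_neg (by simp [List.isPrefixOf]; exact fun h => hc h.symm)]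
        simp only [List.length_cons] at h
        rw [ih t (c :: acc) (by omega)]
        simp [List.filter, hc]

lemma replace_caret_eq_filter (l : List Char) :
    PySem.Chars.replace l ['^'] [] = l.filter (· ≠ '^') := by
  rw [show PySem.Chars.replace l ['^'] [] = PySem.Chars.replace.go ['^'] [] l.length l [] from rfl]
  rw [replace_caret_eq_filter_go l.length l [] le_rfl]
  rfl

-- A's toggle loop, once the markers are removed, is exactly the segment alternation
lemma loopA_filter_eq_joinAlt (cs : List Char) (b : Bool) :
    (sustituirIndiceSuperIndiceLoopA b cs).filter (· ≠ '^')
      = joinAlt supFun b (cs.splitOnP (· == '^')) := by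
  induction cs generalizing b with
  | nil => simp [sustituirIndiceSuperIndiceLoopA, List.splitOnP_nil, joinAlt]
  | cons c t ih =>
    by_cases hc : c = '^'
    · subst hc
      simp only [sustituirIndiceSuperIndiceLoopA]
      rw [show (if b = true ∧ ('^' : Char) ≠ '^' then (numeroASuperindice '^').getD '^' else '^') = '^' by simp]
      rw [if_pos rfl]
      rw [show (if b = true then false else true) = !b by cases b <;> rfl]
      rw [List.splitOnP_cons]
      rw [if_pos (by simp)]
      rw [List.filter_cons, if_neg (by simp)]
      rw [ih]
      cases b <;> simp [joinAlt]
    · simp only [sustituirIndiceSuperIndiceLoopA]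
      rw [show (if b = true ∧ c ≠ '^' then (numeroASuperindice c).getD c else c)
            = if b then supFun c else c by cases b <;> simp [hc, supFun]]
      have hne : (if b then supFun c else c) ≠ '^' := by
        cases b <;> simp [hc, supFun_ne_caret c hc]
      rw [if_neg hne]
      obtain ⟨s, rest, hsr⟩ : ∃ s rest, t.splitOnP (· == '^') = s :: rest := by
        rcases h : t.splitOnP (· == '^') with _ | ⟨s, rest⟩
        · exact absurd h (List.splitOnP_ne_nil _ t)
        · exact ⟨s, rest, rfl⟩
      rw [List.filter_cons, if_pos (by simpa using hne), ih b, List.splitOnP_cons, hsr]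
      simp only [show (c == '^') = false by simp [hc], Bool.false_eq_true, if_false,
        List.modifyHead, joinAlt]
      cases b <;> simp

-- B's enumerate-parity map is the same alternation
lemma zipIdx_parity_eq_joinAlt (segs : List (List Char)) (n : Nat) :
    ((segs.zipIdx n).map
        (fun p => if p.2 % 2 = 1 then p.1.map supFun else p.1)).flatten
      = joinAlt supFun (decide (n % 2 = 1)) segs := by
  induction segs generalizing n with
  | nil => simp [joinAlt]
  | cons s rest ih =>
    rw [List.zipIdx_cons]
    simp only [List.map_cons, List.flatten_cons]
    rw [ih (n + 1)]
    have hpar : (decide ((n + 1) % 2 = 1)) = !(decide (n % 2 = 1)) := by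
      by_cases h : n % 2 = 1 <;> simp [h] <;> omega
    rw [hpar]
    simp only [joinAlt]
    by_cases h : n % 2 = 1 <;> simp [h]

-- ===== VERDICT (by name: the statement is the Claim_ definition above) =====
theorem sustituirIndiceSuperIndice_spec : Claim_equal_sustituirIndiceSuperIndice := by
  intro cadena _ _
  unfold Spec_sustituirIndiceSuperIndice
  unfold sustituirIndiceSuperIndice sustituirIndiceSuperIndice_alt
  rw [replace_caret_eq_filter, loopA_filter_eq_joinAlt]
  rw [show (fun c => (supDict.get? c).getD c) = supFun from funext supDict_eq_supFun]
  rw [show cadena.toList.splitOn '^' = cadena.toList.splitOnP (· == '^') from rfl]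
  rw [zipIdx_parity_eq_joinAlt (cadena.toList.splitOnP (· == '^')) 0]
  rfl
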